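-- pv_equiv track=rewrite | github.com/zhuqianhui2-hash/PPIFlow-Pipeline | src/pipeline/steps/gen.py | _serialize_sample_ids
-- ===== SOURCE A (Python) =====
-- def _serialize_sample_ids(indices: list[int]) -> str:
--     if not indices:
--         return ""
--     ids = sorted(set(int(i) for i in indices))
--     ranges: list[tuple[int, int]] = []
--     start = prev = ids[0]
--     for val in ids[1:]:
--         if val == prev + 1:
--             prev = val
--             continue
--         ranges.append((start, prev))
--         start = prev = val
--     ranges.append((start, prev))
--     parts = [f"{s}-{e}" if s != e else str(s) for s, e in ranges]
--     return ",".join(parts)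
-- ===== SOURCE B (Python) =====
-- def _serialize_sample_ids(indices: list[int]) -> str:
--     ids = sorted({int(i) for i in indices})
--     starts = [b for a, b in zip([None] + ids[:-1], ids) if a is None or b != a + 1]
--     ends = [a for a, b in zip(ids, ids[1:] + [None]) if b is None or b != a + 1]
--     return ",".join(f"{s}-{e}" if s != e else str(s) for s, e in zip(starts, ends))
-- ===== Notes on version B (the rewrite author's own statement) =====
-- stated objective: alternative
-- what changed: Replaced A's start/prev state machine accumulating a ranges list with a declarative formulation: run starts and run ends are found by comparing ids with its shifted copies (two zip/filter comprehensions), then zipped and formatted.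
import Mathlib
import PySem

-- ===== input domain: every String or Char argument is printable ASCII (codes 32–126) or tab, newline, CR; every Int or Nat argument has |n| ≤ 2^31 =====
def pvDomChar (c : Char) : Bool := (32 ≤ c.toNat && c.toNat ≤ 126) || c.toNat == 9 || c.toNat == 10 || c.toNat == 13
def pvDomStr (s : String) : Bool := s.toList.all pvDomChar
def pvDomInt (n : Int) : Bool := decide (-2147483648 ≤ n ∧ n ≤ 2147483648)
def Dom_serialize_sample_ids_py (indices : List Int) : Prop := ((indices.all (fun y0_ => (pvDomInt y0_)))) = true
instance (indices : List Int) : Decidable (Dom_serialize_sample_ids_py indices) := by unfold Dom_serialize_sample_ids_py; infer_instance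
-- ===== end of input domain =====

-- B replaces A's start/prev state machine with a declarative formulation (run starts and ends
-- found by zipping ids with its shifted copies); same cost, different decomposition.

-- ===== PORT A =====
-- the loop body of A's for-loop over ids[1:], state = (ranges, start, prev)
def pvStepA (acc : List (Int × Int) × Int × Int) (val : Int) : List (Int × Int) × Int × Int :=
  if val = acc.2.2 + 1 then (acc.1, acc.2.1, val)
  else (acc.1 ++ [(acc.2.1, acc.2.2)], val, val)

def serialize_sample_ids_py (indices : List Int) : String :=
  if indices = [] then ""
  else
    match PySem.List.sorted (PySem.Set.ofList indices) (fun x => x) false with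
    | [] => ""   -- unreachable guard: sorted(set(indices)) is nonempty when indices ≠ []
    | x :: t =>
      let st := t.foldl pvStepA (([] : List (Int × Int)), x, x)
      let ranges := st.1 ++ [(st.2.1, st.2.2)]
      PySem.Str.join ","
        (ranges.map (fun r => if r.1 ≠ r.2
          then PySem.Int.toStr r.1 ++ "-" ++ PySem.Int.toStr r.2
          else PySem.Int.toStr r.1))

-- ===== PORT B =====
def serialize_sample_ids_py_alt (indices : List Int) : String :=
  let ids := PySem.List.sorted (PySem.Set.ofList indices) (fun x => x) false
  -- starts = [b for a, b in zip([None] + ids[:-1], ids) if a is None or b != a + 1]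
  let starts := ((((none : Option Int) :: ids.dropLast.map some).zip ids).filter
      (fun ab => match ab.1 with | none => true | some a => decide (ab.2 ≠ a + 1))).map (·.2)
  -- ends = [a for a, b in zip(ids, ids[1:] + [None]) if b is None or b != a + 1]
  let ends := ((ids.zip (ids.tail.map some ++ [(none : Option Int)])).filter
      (fun ab => match ab.2 with | none => true | some b => decide (b ≠ ab.1 + 1))).map (·.1)
  PySem.Str.join ","
    ((starts.zip ends).map (fun r => if r.1 ≠ r.2
      then PySem.Int.toStr r.1 ++ "-" ++ PySem.Int.toStr r.2
      else PySem.Int.toStr r.1))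

-- ===== PRECONDITION & SPEC =====
def Spec_serialize_sample_ids_py (indices : List Int) (out : String) : Prop := out = serialize_sample_ids_py_alt indices
instance (indices : List Int) (out : String) : Decidable (Spec_serialize_sample_ids_py indices out) := by unfold Spec_serialize_sample_ids_py; infer_instance

-- ===== CLAIM (what is proved, stated in full; the proofs are below) =====
def Claim_equal_serialize_sample_ids_py : Prop := ∀ (indices : List Int), Dom_serialize_sample_ids_py indices → Spec_serialize_sample_ids_py indices (serialize_sample_ids_py indices)

-- ===== LEMMAS AND PROOFS =====

-- A's final ranges list, as a function of the initial (start, prev) and the remaining ids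
def pvGRanges (s p : Int) (xs : List Int) : List (Int × Int) :=
  let st := xs.foldl pvStepA ([], s, p)
  st.1 ++ [(st.2.1, st.2.2)]

-- B's run starts after a given previous element, and run ends from a given current element
def pvSb (p : Int) : List Int → List Int
  | [] => []
  | v :: t => (if v ≠ p + 1 then [v] else []) ++ pvSb v t

def pvEb (p : Int) : List Int → List Int
  | [] => [p]
  | v :: t => (if v ≠ p + 1 then [p] else []) ++ pvEb v t

theorem pvFoldA_shift (xs : List Int) : ∀ (r : List (Int × Int)) (s p : Int),
    xs.foldl pvStepA (r, s, p)
      = (r ++ (xs.foldl pvStepA ([], s, p)).1, (xs.foldl pvStepA ([], s, p)).2) := by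
  induction xs with
  | nil => intro r s p; simp
  | cons v xs ih =>
    intro r s p
    simp only [List.foldl_cons, pvStepA]
    by_cases h : v = p + 1
    · rw [if_pos h, if_pos h]; exact ih r s v
    · rw [if_neg h, if_neg h, List.nil_append, ih (r ++ [(s, p)]) v v, ih [(s, p)] v v]
      simp

theorem pvGRanges_eq (xs : List Int) : ∀ (s p : Int),
    pvGRanges s p xs = (s :: pvSb p xs).zip (pvEb p xs) := by
  induction xs with
  | nil => intro s p; simp [pvGRanges, pvSb, pvEb]
  | cons v xs ih =>
    intro s p
    simp only [pvGRanges, List.foldl_cons, pvStepA]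
    by_cases h : v = p + 1
    · subst h
      rw [if_pos rfl]
      have h2 := ih s (p + 1)
      simp only [pvGRanges] at h2
      simpa [pvSb, pvEb] using h2
    · rw [if_neg h, List.nil_append, pvFoldA_shift xs [(s, p)] v v]
      simp only [pvSb, pvEb, if_pos h, List.cons_append,
        List.nil_append, List.zip_cons_cons, List.cons.injEq]
      exact ⟨trivial, by simpa [pvGRanges] using ih v v⟩

-- B's starts comprehension, for a nonempty ids list x :: t, yields x :: pvSb x t
theorem pvStarts_tail (t : List Int) : ∀ (p : Int),
    (((((p :: t).dropLast.map some)).zip t).filter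
        (fun ab => match ab.1 with | none => true | some a => decide (ab.2 ≠ a + 1))).map (·.2)
      = pvSb p t := by
  induction t with
  | nil => intro p; simp [pvSb]
  | cons v t ih =>
    intro p
    rw [show (p :: v :: t).dropLast = p :: (v :: t).dropLast from rfl]
    simp only [List.map_cons, List.zip_cons_cons, List.filter_cons]
    by_cases h : v = p + 1
    · subst h; simpa [pvSb] using ih (p + 1)
    · simpa [pvSb, h] using ih v

theorem pvEnds_eq (t : List Int) : ∀ (p : Int),
    (((p :: t).zip ((p :: t).tail.map some ++ [(none : Option Int)])).filter
        (fun ab => match ab.2 with | none => true | some b => decide (b ≠ ab.1 + 1))).map (·.1)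
      = pvEb p t := by
  induction t with
  | nil => intro p; simp [pvEb]
  | cons v t ih =>
    intro p
    simp only [List.tail_cons, List.map_cons, List.cons_append, List.zip_cons_cons,
      List.filter_cons]
    by_cases h : v = p + 1
    · subst h; simpa [pvEb] using ih (p + 1)
    · simpa [pvEb, h] using ih v

theorem pvSortedOfList_ne_nil (indices : List Int) (h : indices ≠ []) :
    PySem.List.sorted (PySem.Set.ofList indices) (fun x => x) false ≠ [] := by
  intro hs
  have h0 : PySem.Set.ofList indices = [] := (PySem.List.sorted_eq_nil_iff _ _ _).mp hs
  match indices, h with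
  | x :: xs, _ =>
    have hx : x ∈ PySem.Set.ofList (x :: xs) := by
      rw [PySem.Set.mem_ofList]; exact List.mem_cons_self ..
    rw [h0] at hx; exact absurd hx (List.not_mem_nil)

-- ===== VERDICT (by name: the statement is the Claim_ definition above) =====
theorem serialize_sample_ids_py_spec : Claim_equal_serialize_sample_ids_py := by
  intro indices _
  unfold Spec_serialize_sample_ids_py serialize_sample_ids_py serialize_sample_ids_py_alt
  by_cases hnil : indices = []
  · subst hnil; decide
  · simp only [if_neg hnil]
    have hne := pvSortedOfList_ne_nil indices hnil
    match hids : PySem.List.sorted (PySem.Set.ofList indices) (fun x => x) false, hne with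
    | x :: t, _ =>
      simp only []
      rw [show ((none : Option Int) :: (x :: t).dropLast.map some).zip (x :: t)
            = (none, x) :: ((x :: t).dropLast.map some).zip t from by
          cases t <;> simp [List.dropLast_cons_of_ne_nil]]
      rw [List.filter_cons]
      simp only [List.map_cons, reduceIte]
      rw [pvStarts_tail t x, pvEnds_eq t x]
      have := pvGRanges_eq t x x
      simp only [pvGRanges] at this
      rw [this]
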